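-- pv_equiv track=rewrite | github.com/laurentfabre/pdf.zig | audit/v1_2_eval.py | page_recall
-- ===== SOURCE A (Python) =====
-- def page_recall(gold_tables: list[dict], predicted: list[dict]) -> tuple[int, int]:
--     """Match each gold table to a predicted table on the same page with
--     the same (n_rows, n_cols) shape. Returns (matched, total_gold)."""
--     matched = 0
--     pred_used = [False] * len(predicted)
--     for g in gold_tables:
--         for i, p in enumerate(predicted):
--             if pred_used[i]:
--                 continue
--             if (p.get("page") == g.get("page")
--                 and p.get("n_rows") == g.get("n_rows")
--                 and p.get("n_cols") == g.get("n_cols")):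
--                 matched += 1
--                 pred_used[i] = True
--                 break
--     return matched, len(gold_tables)
-- ===== SOURCE B (Python) =====
-- def page_recall(gold_tables: list[dict], predicted: list[dict]) -> tuple[int, int]:
--     """Count gold tables matchable to a predicted table on the same page with the
--     same shape, by consuming a multiplicity counter keyed by (page, n_rows, n_cols)."""
--     avail = {}
--     for p in predicted:
--         k = (p.get("page"), p.get("n_rows"), p.get("n_cols"))
--         avail[k] = avail.get(k, 0) + 1
--     matched = 0
--     for g in gold_tables:
--         k = (g.get("page"), g.get("n_rows"), g.get("n_cols"))
--         if avail.get(k, 0) > 0: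
--             avail[k] -= 1
--             matched += 1
--     return matched, len(gold_tables)
-- ===== Notes on version B (the rewrite author's own statement) =====
-- stated objective: alternative
-- what changed: Replaces A's per-gold linear scan over a used-flag array with a counter of predicted (page, n_rows, n_cols) keys built once and decremented per gold table.
import Mathlib
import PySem

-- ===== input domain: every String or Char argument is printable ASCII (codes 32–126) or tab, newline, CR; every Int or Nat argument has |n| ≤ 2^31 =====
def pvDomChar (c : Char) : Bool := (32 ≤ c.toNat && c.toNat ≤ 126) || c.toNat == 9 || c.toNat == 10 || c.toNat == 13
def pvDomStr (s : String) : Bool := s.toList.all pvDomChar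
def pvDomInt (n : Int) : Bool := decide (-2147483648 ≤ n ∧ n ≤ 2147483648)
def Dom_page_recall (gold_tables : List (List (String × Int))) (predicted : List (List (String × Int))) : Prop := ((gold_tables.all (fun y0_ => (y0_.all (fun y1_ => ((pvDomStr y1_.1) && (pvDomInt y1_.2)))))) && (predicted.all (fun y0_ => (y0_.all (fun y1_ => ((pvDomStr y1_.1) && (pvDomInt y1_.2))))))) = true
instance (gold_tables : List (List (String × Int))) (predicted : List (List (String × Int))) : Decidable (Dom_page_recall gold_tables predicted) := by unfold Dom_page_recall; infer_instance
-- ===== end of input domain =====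

-- B replaces A's per-gold linear scan over a used-flag array with a counter of
-- predicted (page, n_rows, n_cols) shape keys built once and decremented per gold
-- table (a different algorithm; not measured faster on the generated inputs).


-- The shape key (page, n_rows, n_cols) read via dict.get (None = missing key).
abbrev PRKey : Type := Option Int × Option Int × Option Int

def prKeyOf (d : List (String × Int)) : PRKey :=
  ((PySem.Dict.ofList d).get? "page",
   (PySem.Dict.ofList d).get? "n_rows",
   (PySem.Dict.ofList d).get? "n_cols")

-- ===== PORT A =====
-- inner loop: 'for i, p in enumerate(predicted): if pred_used[i]: continue; if <match>:
-- matched += 1; pred_used[i] = True; break' — scans used-flags and predicted in lockstep,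
-- returning the updated used list on a match (none = no break taken).
def prFindMark (gk : PRKey) : List Bool → List (List (String × Int)) → Option (List Bool)
  | [], _ => none
  | _, [] => none
  | u :: us, p :: ps =>
      if u then (prFindMark gk us ps).map (fun r => u :: r)
      else if prKeyOf p = gk then some (true :: us)
      else (prFindMark gk us ps).map (fun r => u :: r)

def prLoopA (predicted : List (List (String × Int))) :
    List (List (String × Int)) → Int → List Bool → Int
  | [], matched, _ => matched
  | g :: gs, matched, used =>
      match prFindMark (prKeyOf g) used predicted with
      | some used' => prLoopA predicted gs (matched + 1) used'
      | none => prLoopA predicted gs matched used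

def page_recall (gold_tables : List (List (String × Int))) (predicted : List (List (String × Int))) : Int × Int :=
  (prLoopA predicted gold_tables 0 (List.replicate predicted.length false), (gold_tables.length : Int))

-- ===== PORT B =====
def page_recall_alt (gold_tables : List (List (String × Int))) (predicted : List (List (String × Int))) : Int × Int :=
  let avail : PySem.Dict PRKey Int :=
    predicted.foldl (fun d p => d.insert (prKeyOf p) (d.getD (prKeyOf p) 0 + 1)) PySem.Dict.empty
  let st := gold_tables.foldl
    (fun (st : Int × PySem.Dict PRKey Int) g =>
      let k := prKeyOf g
      if st.2.getD k 0 > 0 then (st.1 + 1, st.2.insert k (st.2.getD k 0 - 1)) else st)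
    (0, avail)
  (st.1, (gold_tables.length : Int))

-- ===== PRECONDITION & SPEC =====
def Spec_page_recall (gold_tables : List (List (String × Int))) (predicted : List (List (String × Int))) (out : Int × Int) : Prop := out = page_recall_alt gold_tables predicted
instance (gold_tables : List (List (String × Int))) (predicted : List (List (String × Int))) (out : Int × Int) : Decidable (Spec_page_recall gold_tables predicted out) := by unfold Spec_page_recall; infer_instance

-- ===== CLAIM (what is proved, stated in full; the proofs are below) =====
def Claim_equal_page_recall : Prop := ∀ (gold_tables : List (List (String × Int))) (predicted : List (List (String × Int))), Dom_page_recall gold_tables predicted → Spec_page_recall gold_tables predicted (page_recall gold_tables predicted)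

-- ===== LEMMAS AND PROOFS =====

-- keys of the not-yet-used predicted tables, in order
def prResidual : List Bool → List (List (String × Int)) → List PRKey
  | [], _ => []
  | _, [] => []
  | u :: us, p :: ps => if u then prResidual us ps else prKeyOf p :: prResidual us ps

-- abstract greedy matcher on the residual key list: both programs compute this
def prGreedy : List (List (String × Int)) → List PRKey → Int
  | [], _ => 0
  | g :: gs, r =>
      if prKeyOf g ∈ r then prGreedy gs (r.erase (prKeyOf g)) + 1 else prGreedy gs r

theorem prFindMark_none_iff (gk : PRKey) (us : List Bool) (ps : List (List (String × Int))) :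
    prFindMark gk us ps = none ↔ gk ∉ prResidual us ps := by
  induction us generalizing ps with
  | nil => cases ps <;> simp [prFindMark, prResidual]
  | cons u us ih =>
    cases ps with
    | nil => simp [prFindMark, prResidual]
    | cons p ps =>
      by_cases hu : u
      · simpa [prFindMark, prResidual, hu] using ih ps
      · by_cases hk : prKeyOf p = gk
        · simp [prFindMark, prResidual, hu, hk]
        · simp [prFindMark, prResidual, hu, hk, ih ps, Ne.symm hk]

theorem prFindMark_some (gk : PRKey) (us : List Bool) (ps : List (List (String × Int)))
    (us' : List Bool) (h : prFindMark gk us ps = some us') :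
    prResidual us' ps = (prResidual us ps).erase gk := by
  induction us generalizing ps us' with
  | nil => cases ps <;> simp [prFindMark] at h
  | cons u us ih =>
    cases ps with
    | nil => simp [prFindMark] at h
    | cons p ps =>
      by_cases hu : u
      · simp [prFindMark, hu, Option.map_eq_some_iff] at h
        obtain ⟨r, hr, rfl⟩ := h
        simp [prResidual, hu, ih ps r hr]
      · by_cases hk : prKeyOf p = gk
        · simp [prFindMark, hu, hk] at h
          subst h
          simp [prResidual, hu, hk, List.erase_cons_head]
        · simp [prFindMark, hu, hk, Option.map_eq_some_iff] at h
          obtain ⟨r, hr, rfl⟩ := h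
          simp [prResidual, hu, ih ps r hr, List.erase_cons_tail, hk]

theorem prLoopA_eq_greedy (predicted : List (List (String × Int)))
    (gs : List (List (String × Int))) (m : Int) (used : List Bool) :
    prLoopA predicted gs m used = m + prGreedy gs (prResidual used predicted) := by
  induction gs generalizing m used with
  | nil => simp [prLoopA, prGreedy]
  | cons g gs ih =>
    cases h : prFindMark (prKeyOf g) used predicted with
    | none =>
      have hmem : prKeyOf g ∉ prResidual used predicted :=
        (prFindMark_none_iff _ _ _).mp h
      simp [prLoopA, h, ih, prGreedy, hmem]
    | some used' =>
      have hmem : prKeyOf g ∈ prResidual used predicted := by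
        by_contra hc
        rw [← prFindMark_none_iff] at hc
        simp [h] at hc
      simp only [prLoopA, h]
      rw [ih, prFindMark_some _ _ _ _ h]
      simp [prGreedy, hmem]
      ring

theorem prResidual_replicate (ps : List (List (String × Int))) :
    prResidual (List.replicate ps.length false) ps = ps.map prKeyOf := by
  induction ps with
  | nil => rfl
  | cons p ps ih => simp [prResidual, List.replicate_succ, ih]

theorem prLoopB_eq_greedy (gs : List (List (String × Int))) (m : Int)
    (d : PySem.Dict PRKey Int) (r : List PRKey)
    (hinv : ∀ k, d.getD k 0 = (r.count k : Int)) :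
    (gs.foldl
      (fun (st : Int × PySem.Dict PRKey Int) g =>
        let k := prKeyOf g
        if st.2.getD k 0 > 0 then (st.1 + 1, st.2.insert k (st.2.getD k 0 - 1)) else st)
      (m, d)).1 = m + prGreedy gs r := by
  induction gs generalizing m d r with
  | nil => simp [prGreedy]
  | cons g gs ih =>
    by_cases hmem : prKeyOf g ∈ r
    · have hcnt : 0 < r.count (prKeyOf g) := List.count_pos_iff.mpr hmem
      have hpos : d.getD (prKeyOf g) 0 > 0 := by rw [hinv]; exact_mod_cast hcnt
      have hinv' : ∀ k, (d.insert (prKeyOf g) (d.getD (prKeyOf g) 0 - 1)).getD k 0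
          = ((r.erase (prKeyOf g)).count k : Int) := by
        intro k
        rw [PySem.Dict.getD_insert, List.count_erase]
        by_cases hk : k = prKeyOf g
        · simp only [hk, hinv, beq_self_eq_true, if_true]
          omega
        · have : (prKeyOf g == k) = false := by
            simp [beq_eq_false_iff_ne, Ne.symm hk]
          simp [hk, hinv, this]
      simp only [List.foldl_cons, if_pos hpos]
      rw [ih (m + 1) _ _ hinv']
      simp [prGreedy, hmem]
      ring
    · have hz : r.count (prKeyOf g) = 0 := List.count_eq_zero.mpr hmem
      have hnpos : ¬ d.getD (prKeyOf g) 0 > 0 := by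
        rw [hinv, hz]; simp
      simp only [List.foldl_cons, if_neg hnpos]
      rw [ih m d r hinv]
      simp [prGreedy, hmem]

theorem prAvail_inv (predicted : List (List (String × Int))) (k : PRKey) :
    (predicted.foldl (fun d p => d.insert (prKeyOf p) (d.getD (prKeyOf p) 0 + 1))
      (PySem.Dict.empty : PySem.Dict PRKey Int)).getD k 0
    = ((predicted.map prKeyOf).count k : Int) := by
  rw [← List.foldl_map (f := prKeyOf)
    (g := fun (d : PySem.Dict PRKey Int) x => d.insert x (d.getD x 0 + 1))]
  rw [PySem.Dict.getD_foldl_insert_add_one]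
  simp

-- ===== VERDICT (by name: the statement is the Claim_ definition above) =====
theorem page_recall_spec : Claim_equal_page_recall := by
  intro gold predicted _
  unfold Spec_page_recall page_recall page_recall_alt
  have hb := prLoopB_eq_greedy gold 0
    (predicted.foldl (fun d p => d.insert (prKeyOf p) (d.getD (prKeyOf p) 0 + 1))
      PySem.Dict.empty)
    (predicted.map prKeyOf) (prAvail_inv predicted)
  have ha := prLoopA_eq_greedy predicted gold 0 (List.replicate predicted.length false)
  rw [prResidual_replicate] at ha
  simp only [ha]
  exact Prod.ext (by rw [hb]) rfl
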